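-- pv_equiv track=rewrite | github.com/New-Ha/Algorithm | 프로그래머스/lv0/120863. 다항식 더하기/다항식 더하기.py | solution
-- ===== SOURCE A (Python) =====
-- def solution(polynomial):
--     splited = polynomial.split(' + ');
--     n = sum([int(i) for i in splited if 'x' not in i])
--     xnum = sum([1 if i == 'x' else int(i[0:-1]) for i in splited if 'x' in i])
--
--     if xnum == 0:
--         return str(n)
--     elif xnum == 1:
--         return 'x + '+str(n) if n != 0 else 'x'
--     else:
--         return str(xnum)+'x + '+ str(n) if n != 0 else str(xnum)+'x'
-- ===== SOURCE B (Python) =====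
-- def evaluate(polynomial, v):
--     total = 0
--     for t in polynomial.split(' + '):
--         if t == 'x':
--             total += v
--         elif 'x' in t:
--             total += int(t[:-1]) * v
--         else:
--             total += int(t)
--     return total
--
--
-- def solution(polynomial):
--     # finite differences: for p(x) = a*x + b we have b = p(0) and a = p(1) - p(0)
--     n = evaluate(polynomial, 0)
--     xnum = evaluate(polynomial, 1) - n
--     parts = []
--     if xnum:
--         parts.append('x' if xnum == 1 else str(xnum) + 'x')
--     if n:
--         parts.append(str(n))
--     return ' + '.join(parts) or str(n)
-- ===== Notes on version B (the rewrite author's own statement) =====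
-- stated objective: alternative
-- what changed: B recovers the two coefficients by evaluating the polynomial at x=0 and x=1 (finite differences: n = p(0), xnum = p(1) - p(0)) with a single generic evaluator, instead of A's two filtered per-class comprehension sums, and formats by joining a list of fragments instead of A's nested branch tree.
import Mathlib
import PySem

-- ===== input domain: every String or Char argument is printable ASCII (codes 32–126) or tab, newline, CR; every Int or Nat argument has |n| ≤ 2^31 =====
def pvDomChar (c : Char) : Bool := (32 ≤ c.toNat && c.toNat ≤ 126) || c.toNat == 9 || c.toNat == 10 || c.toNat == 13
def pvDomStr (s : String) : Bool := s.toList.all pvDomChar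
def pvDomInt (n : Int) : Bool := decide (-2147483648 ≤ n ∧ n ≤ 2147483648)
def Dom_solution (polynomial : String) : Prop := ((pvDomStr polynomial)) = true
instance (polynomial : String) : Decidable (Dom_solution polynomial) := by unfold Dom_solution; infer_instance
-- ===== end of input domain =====

-- B recovers the coefficients by evaluating the polynomial at x=0 and x=1 (finite differences)
-- instead of A's two filtered per-class sums, and formats by joining a fragment list (objective: alternative).

-- ===== PORT A =====
def solution (polynomial : String) : String :=
  let splited := (PySem.Str.split? polynomial " + ").getD []
  let n : Int := ((splited.filter (fun i => !(PySem.Str.isIn "x" i))).map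
      (fun i => (PySem.Int.ofStr? i).getD 0)).sum
  let xnum : Int := ((splited.filter (fun i => PySem.Str.isIn "x" i)).map
      (fun i => if i == "x" then (1 : Int)
                else (PySem.Int.ofStr? (PySem.Str.slice i (some 0) (some (-1)))).getD 0)).sum
  if xnum == 0 then PySem.Int.toStr n
  else if xnum == 1 then
    (if n != 0 then "x + " ++ PySem.Int.toStr n else "x")
  else
    (if n != 0 then PySem.Int.toStr xnum ++ "x + " ++ PySem.Int.toStr n
     else PySem.Int.toStr xnum ++ "x")

-- ===== PORT B =====
-- B's helper evaluate(polynomial, v): the value of the polynomial at x = v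
def pvEvaluate (polynomial : String) (v : Int) : Int :=
  ((PySem.Str.split? polynomial " + ").getD []).foldl
    (fun (total : Int) t =>
      if t == "x" then total + v
      else if PySem.Str.isIn "x" t then
        total + ((PySem.Int.ofStr? (PySem.Str.slice t none (some (-1)))).getD 0) * v
      else total + (PySem.Int.ofStr? t).getD 0) 0

def solution_alt (polynomial : String) : String :=
  let n := pvEvaluate polynomial 0
  let xnum := pvEvaluate polynomial 1 - n
  let parts : List String :=
    (if xnum ≠ 0 then [if xnum == 1 then "x" else PySem.Int.toStr xnum ++ "x"] else [])
    ++ (if n ≠ 0 then [PySem.Int.toStr n] else [])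
  if parts.isEmpty then PySem.Int.toStr n else PySem.Str.join " + " parts

-- ===== PRECONDITION & SPEC =====
-- Pre_ excludes exactly the inputs where Python A raises ValueError: a constant token
-- that int() cannot parse, or a variable token (other than the bare variable) whose
-- all-but-last-character prefix int() cannot parse.
def Pre_solution (polynomial : String) : Prop :=
  (((PySem.Str.split? polynomial " + ").getD []).all (fun t =>
    if PySem.Str.isIn "x" t then
      (t == "x" || (PySem.Int.ofStr? (PySem.Str.slice t none (some (-1)))).isSome)
    else (PySem.Int.ofStr? t).isSome)) = true
instance (polynomial : String) : Decidable (Pre_solution polynomial) := by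
  unfold Pre_solution; infer_instance

def pvWitness_solution : String := "3x + 7"

def Spec_solution (polynomial : String) (out : String) : Prop := out = solution_alt polynomial
instance (polynomial : String) (out : String) : Decidable (Spec_solution polynomial out) := by
  unfold Spec_solution; infer_instance

-- ===== CLAIM (what is proved, stated in full; the proofs are below) =====
def Claim_equal_solution : Prop := ∀ (polynomial : String), Dom_solution polynomial → Pre_solution polynomial → Spec_solution polynomial (solution polynomial)

-- ===== LEMMAS AND PROOFS =====

-- A's i[0:-1] and B's t[:-1] are the same slice
theorem slice_zero_neg_one (s : String) :
    PySem.Str.slice s (some 0) (some (-1)) = PySem.Str.slice s none (some (-1)) := by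
  simp [PySem.Str.slice]

-- B's evaluator at x = v is (sum of constant tokens) + v * (sum of x-coefficients),
-- the two sums being exactly A's filtered-comprehension sums
theorem eval_fold (toks : List String) (a v : Int) :
    toks.foldl
      (fun (total : Int) t =>
        if t == "x" then total + v
        else if PySem.Str.isIn "x" t then
          total + ((PySem.Int.ofStr? (PySem.Str.slice t none (some (-1)))).getD 0) * v
        else total + (PySem.Int.ofStr? t).getD 0) a
    = a + ((toks.filter (fun i => !(PySem.Str.isIn "x" i))).map
            (fun i => (PySem.Int.ofStr? i).getD 0)).sum
        + v * ((toks.filter (fun i => PySem.Str.isIn "x" i)).map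
            (fun i => if i == "x" then (1 : Int)
                      else (PySem.Int.ofStr? (PySem.Str.slice i (some 0) (some (-1)))).getD 0)).sum := by
  induction toks generalizing a with
  | nil => simp
  | cons t ts ih =>
    by_cases hx : t = "x"
    · subst hx
      have hin : PySem.Str.isIn "x" "x" = true := by decide
      simp only [List.foldl_cons, beq_self_eq_true, if_true, ih, List.filter_cons, hin,
        Bool.not_true, Bool.false_eq_true, if_false, if_true, List.map_cons, List.sum_cons,
        beq_self_eq_true]
      ring
    · have hne : (t == "x") = false := by simp [hx]
      by_cases h : PySem.Str.isIn "x" t = true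
      · simp only [List.foldl_cons, Bool.false_eq_true, if_false, h, if_true, ih,
          List.filter_cons, Bool.not_true, List.map_cons, List.sum_cons, hne,
          slice_zero_neg_one]
        ring
      · simp only [List.foldl_cons, hne, Bool.false_eq_true, if_false, h, ih,
          List.filter_cons, Bool.not_false, if_true, List.map_cons, List.sum_cons]
        simp
        ring

theorem join_two (a b : String) : PySem.Str.join " + " [a, b] = a ++ " + " ++ b := by
  apply String.toList_inj.mp
  simp [PySem.Str.toList_join, PySem.Chars.join_cons_cons, PySem.Chars.join_singleton]

theorem join_one (a : String) : PySem.Str.join " + " [a] = a := by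
  apply String.toList_inj.mp
  simp [PySem.Str.toList_join, PySem.Chars.join_singleton]

theorem cx_plus_eq (c s : String) : (c ++ "x") ++ " + " ++ s = c ++ "x + " ++ s := by
  apply String.toList_inj.mp
  simp

-- A's nested branch tree equals B's parts-list-and-join formatter
theorem format_eq (n xnum : Int) :
    (if xnum == 0 then PySem.Int.toStr n
     else if xnum == 1 then
       (if n != 0 then "x + " ++ PySem.Int.toStr n else "x")
     else
       (if n != 0 then PySem.Int.toStr xnum ++ "x + " ++ PySem.Int.toStr n
        else PySem.Int.toStr xnum ++ "x"))
    = (let parts : List String :=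
         (if xnum ≠ 0 then [if xnum == 1 then "x" else PySem.Int.toStr xnum ++ "x"] else [])
         ++ (if n ≠ 0 then [PySem.Int.toStr n] else []);
       if parts.isEmpty then PySem.Int.toStr n else PySem.Str.join " + " parts) := by
  by_cases hx0 : xnum = 0
  · subst hx0
    by_cases hn0 : n = 0
    · subst hn0; simp
    · simp [hn0, join_one]
  · by_cases hx1 : xnum = 1
    · subst hx1
      by_cases hn0 : n = 0
      · subst hn0; simp [join_one]
      · simp [hn0, join_two]
    · by_cases hn0 : n = 0
      · subst hn0; simp [hx0, hx1, join_one]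
      · simp [hx0, hx1, hn0, join_two, cx_plus_eq]

-- ===== VERDICT (by name: the statement is the Claim_ definition above) =====
theorem solution_spec : Claim_equal_solution := by
  intro polynomial _ _
  unfold Spec_solution
  simp only [solution, solution_alt, pvEvaluate, eval_fold]
  simp only [zero_add, zero_mul, one_mul, add_zero, add_sub_cancel_left]
  exact format_eq _ _
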